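-- pv_equiv track=rewrite | github.com/luchenghsu/coursera-principal-of-computing | Yahtzee.py | gen_all_holds
-- ===== SOURCE A (Python) =====
-- def gen_all_holds(hand):
--     """
--     Generate all possible choices of dice from hand to hold.
--
--     hand: full yahtzee hand
--
--     Returns a set of tuples, where each tuple is dice to hold
--     """
--     complete_set = list(hand)
--     binary_counts =[bin(x)[2:].rjust(len(hand),'0') for x in range(2**len(hand))]
--
--     power_set = set([()])
--
--     for count in binary_counts:
--         power_set.add(tuple([complete_set[i] for i in range(len(count))
--                          if count[i] == '1']))
--
--
--     return power_set
-- ===== SOURCE B (Python) =====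
-- def gen_all_holds(hand):
--     """
--     Generate all possible choices of dice from hand to hold.
--
--     hand: full yahtzee hand
--
--     Returns a set of tuples, where each tuple is dice to hold
--     """
--     hand = list(hand)
--
--     def subs(start):
--         if start == len(hand):
--             return [()]
--         rest = subs(start + 1)
--         return rest + [(hand[start],) + sub for sub in rest]
--
--     return set(subs(0))
-- ===== Notes on version B (the rewrite author's own statement) =====
-- stated objective: simpler
-- what changed: A enumerates all 2^n index subsets via binary strings (bin(x).rjust) and scans each string; B builds the subset list by a structural recursion on the hand (doubling: subsets without the first die plus the same subsets with it prepended) and deduplicates once with set() at the end.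
import Mathlib
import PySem

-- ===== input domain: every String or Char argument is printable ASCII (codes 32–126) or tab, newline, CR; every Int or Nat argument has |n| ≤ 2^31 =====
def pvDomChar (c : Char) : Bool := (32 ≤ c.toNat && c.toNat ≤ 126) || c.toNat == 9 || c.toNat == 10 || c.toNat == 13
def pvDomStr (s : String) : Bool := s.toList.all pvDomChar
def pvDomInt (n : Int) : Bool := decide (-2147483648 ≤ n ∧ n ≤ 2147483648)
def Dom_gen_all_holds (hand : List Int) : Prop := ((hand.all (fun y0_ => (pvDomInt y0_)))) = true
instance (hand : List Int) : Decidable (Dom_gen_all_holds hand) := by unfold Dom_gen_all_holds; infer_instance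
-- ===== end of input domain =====

-- B replaces A's binary-string enumeration of all 2^n index subsets by a structural
-- recursion doubling the subset list element by element, deduplicated once at the end (objective: simpler).

-- ===== PORT A =====
-- bin(x)[2:] for x ≥ 1 (digit list, most significant first); pvBinCore 0 = []
def pvBinCore : Nat → List Char
  | 0 => []
  | x + 1 => pvBinCore ((x + 1) / 2) ++ [if (x + 1) % 2 = 1 then '1' else '0']
decreasing_by exact Nat.div_lt_self (Nat.succ_pos x) (by norm_num)

-- bin(x)[2:]
def pvBin (x : Nat) : List Char := if x = 0 then ['0'] else pvBinCore x

-- s.rjust(n, '0')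
def pvRjust0 (n : Nat) (s : List Char) : List Char := List.replicate (n - s.length) '0' ++ s

-- [complete_set[i] for i in range(len(count)) if count[i] == '1']
-- exact: whenever count[i] == '1' we also have i < hand.length (count is a ≤-len(hand)-bit
-- string padded to len(hand), with the single '0' of bin(0) when hand = []), so hand[i]? is
-- some (hand[i]) and Python's complete_set[i] never raises.
def pvSubsetAt (hand : List Int) (count : List Char) : List Int :=
  (List.range count.length).filterMap (fun i => if count[i]? = some '1' then hand[i]? else none)

def gen_all_holds (hand : List Int) : List (List Int) :=
  let complete_set := hand
  -- range(2**len(hand)) enumerates the non-negative ints 0..2^n-1: List.range is exact here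
  let binary_counts := (List.range (2 ^ hand.length)).map (fun x => pvRjust0 hand.length (pvBin x))
  binary_counts.foldl (fun power_set count => PySem.Set.add power_set (pvSubsetAt complete_set count))
    (PySem.Set.ofList [[]])

-- ===== PORT B =====
-- subs(start) from Source B: recursion over the rest of the hand (hand[start] is the head)
def pvSubs : List Int → List (List Int)
  | [] => [[]]
  | h :: t =>
    let rest := pvSubs t
    rest ++ rest.map (fun sub => h :: sub)

def gen_all_holds_alt (hand : List Int) : List (List Int) :=
  PySem.Set.ofList (pvSubs hand)

-- ===== PRECONDITION & SPEC =====
def Spec_gen_all_holds (hand : List Int) (out : List (List Int)) : Prop := out = gen_all_holds_alt hand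
instance (hand : List Int) (out : List (List Int)) : Decidable (Spec_gen_all_holds hand out) := by unfold Spec_gen_all_holds; infer_instance

-- ===== CLAIM (what is proved, stated in full; the proofs are below) =====
def Claim_equal_gen_all_holds : Prop := ∀ (hand : List Int), Dom_gen_all_holds hand → Spec_gen_all_holds hand (gen_all_holds hand)

-- ===== LEMMAS AND PROOFS =====

-- the low n bits of x, most significant first (proof-only normal form of A's padded strings)
def pvBitsW : Nat → Nat → List Char
  | 0, _ => []
  | n + 1, x => (if x.testBit n then '1' else '0') :: pvBitsW n x

theorem pvBitsW_length (n x : Nat) : (pvBitsW n x).length = n := by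
  induction n with
  | zero => rfl
  | succ m ih => simp [pvBitsW, ih]

theorem pvBitsW_zero (n : Nat) : pvBitsW n 0 = List.replicate n '0' := by
  induction n with
  | zero => rfl
  | succ m ih => simp [pvBitsW, ih, List.replicate_succ]

theorem pvBitsW_congr {n x y : Nat} (h : ∀ i, i < n → x.testBit i = y.testBit i) :
    pvBitsW n x = pvBitsW n y := by
  induction n with
  | zero => rfl
  | succ m ih =>
    simp only [pvBitsW]
    rw [h m (Nat.lt_succ_self m), ih (fun i hi => h i (Nat.lt_succ_of_lt hi))]

theorem pvBitsW_snoc (n x : Nat) :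
    pvBitsW (n + 1) x = pvBitsW n (x / 2) ++ [if x.testBit 0 then '1' else '0'] := by
  induction n generalizing x with
  | zero => rfl
  | succ m ih =>
    rw [show pvBitsW (m + 1 + 1) x = (if x.testBit (m + 1) then '1' else '0') :: pvBitsW (m + 1) x
      from rfl, ih x,
      show pvBitsW (m + 1) (x / 2) = (if (x / 2).testBit m then '1' else '0') :: pvBitsW m (x / 2)
      from rfl, Nat.testBit_div_two]
    simp

theorem pvBinCore_length {n : Nat} : ∀ x, x < 2 ^ n → (pvBinCore x).length ≤ n := by
  induction n with
  | zero => intro x hx; interval_cases x; simp [pvBinCore]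
  | succ m ih =>
    intro x hx
    match x with
    | 0 => simp [pvBinCore]
    | y + 1 =>
      rw [pvBinCore]
      have h2 : (y + 1) / 2 < 2 ^ m := Nat.div_lt_of_lt_mul (by rw [pow_succ] at hx; omega)
      have := ih _ h2
      simp only [List.length_append, List.length_cons, List.length_nil]
      omega

theorem pvBinCore_eq_bitsW {k : Nat} : ∀ x, 2 ^ k ≤ x → x < 2 ^ (k + 1) →
    pvBinCore x = pvBitsW (k + 1) x := by
  induction k with
  | zero =>
    intro x h1 h2
    interval_cases x
    simp [pvBinCore, pvBitsW]
  | succ m ih =>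
    intro x h1 h2
    match x with
    | 0 => simp at h1
    | y + 1 =>
      rw [pvBinCore]
      have hlo : 2 ^ m ≤ (y + 1) / 2 := by
        apply Nat.le_div_iff_mul_le (by norm_num) |>.mpr
        have : 2 ^ (m + 1) = 2 ^ m * 2 := by ring
        omega
      have hhi : (y + 1) / 2 < 2 ^ (m + 1) := by
        apply Nat.div_lt_of_lt_mul
        have : 2 ^ (m + 1 + 1) = 2 ^ (m + 1) * 2 := by ring
        omega
      rw [ih _ hlo hhi, pvBitsW_snoc (m + 1) (y + 1)]
      congr 1
      simp [Nat.testBit_zero]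

theorem pvRjust0_bin_eq_bitsW {n : Nat} : ∀ x, 1 ≤ n → x < 2 ^ n →
    pvRjust0 n (pvBin x) = pvBitsW n x := by
  induction n with
  | zero => intro x h; omega
  | succ m ih =>
    intro x _ hx
    match x with
    | 0 =>
      simp [pvBin, pvRjust0, pvBitsW_zero, ← List.replicate_succ']
    | y + 1 =>
      by_cases hlt : y + 1 < 2 ^ m
      · have hm : 1 ≤ m := by
          by_contra h
          have : m = 0 := by omega
          subst this
          omega
        have hlen : (pvBin (y + 1)).length ≤ m := by
          simpa [pvBin] using pvBinCore_length (y + 1) hlt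
        have hpad : pvRjust0 (m + 1) (pvBin (y + 1)) = '0' :: pvRjust0 m (pvBin (y + 1)) := by
          unfold pvRjust0
          rw [show m + 1 - (pvBin (y + 1)).length = (m - (pvBin (y + 1)).length) + 1 by omega,
            List.replicate_succ]
          rfl
        rw [hpad, ih _ hm hlt]
        simp [pvBitsW, Nat.testBit_lt_two_pow hlt]
      · have hge : 2 ^ m ≤ y + 1 := by omega
        have hcore := pvBinCore_eq_bitsW (y + 1) hge hx
        have hlen : (pvBinCore (y + 1)).length = m + 1 := by rw [hcore]; exact pvBitsW_length _ _
        simp [pvBin, pvRjust0, hcore, pvBitsW_length]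

theorem pvSubsetAt_cons (h : Int) (t : List Int) (b : Char) (c : List Char) :
    pvSubsetAt (h :: t) (b :: c) =
      if b = '1' then h :: pvSubsetAt t c else pvSubsetAt t c := by
  by_cases hb : b = '1' <;>
    simp [pvSubsetAt, List.range_succ_eq_map, List.filterMap_map, hb]

theorem pvMap_bitsW_eq_subs : ∀ hand : List Int,
    (List.range (2 ^ hand.length)).map (fun x => pvSubsetAt hand (pvBitsW hand.length x))
      = pvSubs hand := by
  intro hand
  induction hand with
  | nil => rfl
  | cons h t ih =>
    have hpow : 2 ^ (t.length + 1) = 2 ^ t.length + 2 ^ t.length := by ring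
    simp only [List.length_cons, hpow, List.range_add, List.map_append, List.map_map]
    have h1 : (List.range (2 ^ t.length)).map
        (fun x => pvSubsetAt (h :: t) (pvBitsW (t.length + 1) x)) = pvSubs t := by
      rw [← ih]
      apply List.map_congr_left
      intro x hx
      rw [List.mem_range] at hx
      have hbit : pvBitsW (t.length + 1) x = '0' :: pvBitsW t.length x := by
        simp [pvBitsW, Nat.testBit_lt_two_pow hx]
      rw [hbit, pvSubsetAt_cons]
      simp
    have h2 : (List.range (2 ^ t.length)).map
        ((fun x => pvSubsetAt (h :: t) (pvBitsW (t.length + 1) x)) ∘ (fun x => 2 ^ t.length + x))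
        = (pvSubs t).map (fun sub => h :: sub) := by
      rw [← ih, List.map_map]
      apply List.map_congr_left
      intro x hx
      rw [List.mem_range] at hx
      have hbit : pvBitsW (t.length + 1) (2 ^ t.length + x) = '1' :: pvBitsW t.length x := by
        have hhead : (2 ^ t.length + x).testBit t.length = true := by
          simp [Nat.testBit_two_pow_add_eq, Nat.testBit_lt_two_pow hx]
        have htail : pvBitsW t.length (2 ^ t.length + x) = pvBitsW t.length x :=
          pvBitsW_congr (fun i hi => Nat.testBit_two_pow_add_gt hi x)
        simp [pvBitsW, hhead, htail]
      simp [Function.comp_apply, hbit, pvSubsetAt_cons]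
    rw [h1, h2]
    rfl

theorem pvSubs_head : ∀ hand : List Int, ∃ rest, pvSubs hand = [] :: rest := by
  intro hand
  induction hand with
  | nil => exact ⟨[], rfl⟩
  | cons h t ih =>
    obtain ⟨r, hr⟩ := ih
    exact ⟨r ++ (pvSubs t).map (fun sub => h :: sub), by simp [pvSubs, hr]⟩

-- ===== VERDICT (by name: the statement is the Claim_ definition above) =====
theorem gen_all_holds_spec : Claim_equal_gen_all_holds := by
  intro hand _
  unfold Spec_gen_all_holds gen_all_holds gen_all_holds_alt
  simp only []
  rw [List.foldl_map]
  have hcounts : (List.range (2 ^ hand.length)).foldl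
      (fun power_set x => PySem.Set.add power_set (pvSubsetAt hand (pvRjust0 hand.length (pvBin x))))
      (PySem.Set.ofList [[]])
      = (List.range (2 ^ hand.length)).foldl
        (fun power_set x => PySem.Set.add power_set (pvSubsetAt hand (pvBitsW hand.length x)))
        (PySem.Set.ofList [[]]) := by
    cases hand with
    | nil => rfl
    | cons h t =>
      apply PySem.List.foldl_congr_mem
      intro acc x hx
      rw [List.mem_range] at hx
      rw [pvRjust0_bin_eq_bitsW x (by simp) hx]
  rw [hcounts, ← List.foldl_map, pvMap_bitsW_eq_subs]
  obtain ⟨rest, hr⟩ := pvSubs_head hand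
  rw [hr, PySem.Set.ofList_eq_foldl]
  rfl
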